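-- pv_equiv track=rewrite | github.com/kevinglover/advent2024 | day-2/part-2/main.py | can_pass_by_removing_one
-- ===== SOURCE A (Python) =====
-- def are_close(a, b, limit=3):
--   if a == b:
--     return False
--   return abs(a - b) <= limit
--
-- def is_sorted(arr):
--   ascending = all(arr[i] <= arr[i + 1] for i in range(len(arr) - 1))
--   descending = all(arr[i] >= arr[i + 1] for i in range(len(arr) - 1))
--   return ascending or descending
--
-- def are_close_and_sorted(arr):
--   are_close_list = [are_close(arr[i], arr[i + 1]) for i in range(len(arr) - 1)]
--   return is_sorted(arr) and are_close_list.count(False) == 0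
--
-- def can_pass_by_removing_one(arr):
--   if are_close_and_sorted(arr):
--     return True
--
--   for i in range(len(arr)):
--     modified_arr = arr[:i] + arr[i + 1:]
--     if are_close_and_sorted(modified_arr):
--       return True
--
--   return False
-- ===== SOURCE B (Python) =====
-- def can_pass_by_removing_one(arr):
--   def good(a, b):
--     return a < b and b - a <= 3
--
--   def safe(xs):
--     for k in range(len(xs) - 1):
--       if not good(xs[k], xs[k + 1]):
--         return False
--     return True
--
--   def fixable(xs):
--     # linear pass: at the first bad adjacent pair, only dropping one of its
--     # two elements can help (any other drop leaves the bad pair adjacent)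
--     for k in range(len(xs) - 1):
--       if good(xs[k], xs[k + 1]):
--         continue
--       drop_left = (k == 0 or good(xs[k - 1], xs[k + 1])) and safe(xs[k + 1:])
--       drop_right = safe([xs[k]] + xs[k + 2:])
--       return drop_left or drop_right
--     return True
--
--   return fixable(arr) or fixable([-x for x in arr])
-- ===== Notes on version B (the rewrite author's own statement) =====
-- stated objective: faster
-- what changed: A tries every one-element removal and re-scans each candidate list (plus building it by slicing); B does one linear pass per direction (as-is and negated) that stops at the first bad adjacent pair and tests only the two removals that can possibly fix it.
import Mathlib
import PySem

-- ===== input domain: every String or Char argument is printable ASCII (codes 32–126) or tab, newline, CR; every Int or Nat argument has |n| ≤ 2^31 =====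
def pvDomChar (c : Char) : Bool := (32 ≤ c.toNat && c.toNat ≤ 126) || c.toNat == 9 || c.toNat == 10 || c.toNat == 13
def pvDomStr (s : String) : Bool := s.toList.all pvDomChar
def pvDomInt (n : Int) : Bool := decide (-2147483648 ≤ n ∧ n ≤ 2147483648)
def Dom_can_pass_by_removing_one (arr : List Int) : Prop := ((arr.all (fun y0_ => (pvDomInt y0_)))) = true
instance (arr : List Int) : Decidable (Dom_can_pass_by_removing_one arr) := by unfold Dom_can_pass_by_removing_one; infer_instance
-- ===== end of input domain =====

-- B replaces A's O(n^2) try-every-removal scan by a single linear pass per direction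
-- that only tests the two removals at the first bad adjacent pair (objective: faster, asymptotic).

-- ===== PORT A =====
-- indices produced by the ranges below are always in bounds, so pyGetD with default 0 is exact
def are_close (a b : Int) (limit : Int) : Bool :=
  if a == b then false else decide (|a - b| ≤ limit)

def is_sorted (arr : List Int) : Bool :=
  let ascending := (PySem.List.pyRange 0 ((arr.length : Int) - 1) 1).all
    (fun i => decide (PySem.List.pyGetD arr i 0 ≤ PySem.List.pyGetD arr (i + 1) 0))
  let descending := (PySem.List.pyRange 0 ((arr.length : Int) - 1) 1).all
    (fun i => decide (PySem.List.pyGetD arr i 0 ≥ PySem.List.pyGetD arr (i + 1) 0))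
  ascending || descending

def are_close_and_sorted (arr : List Int) : Bool :=
  let are_close_list := (PySem.List.pyRange 0 ((arr.length : Int) - 1) 1).map
    (fun i => are_close (PySem.List.pyGetD arr i 0) (PySem.List.pyGetD arr (i + 1) 0) 3)
  is_sorted arr && (are_close_list.count false == 0)

def can_pass_by_removing_one (arr : List Int) : Bool :=
  if are_close_and_sorted arr then true
  else
    (PySem.List.pyRange 0 (arr.length : Int) 1).any
      (fun i => are_close_and_sorted
        (PySem.List.slice arr none (some i) ++ PySem.List.slice arr (some (i + 1)) none))

-- ===== PORT B =====
def pvGood (a b : Int) : Bool := decide (a < b) && decide (b - a ≤ 3)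

-- safe: every adjacent pair is a strict rise of at most 3
def pvSafe : List Int → Bool
  | a :: b :: rest => pvGood a b && pvSafe (b :: rest)
  | _ => true

-- linear pass carrying the previous element; at the first bad pair, test the
-- only two removals that can help (dropping the left or the right element)
def pvFixable : Option Int → List Int → Bool
  | prev, a :: b :: rest =>
    if pvGood a b then pvFixable (some a) (b :: rest)
    else
      ((match prev with | none => true | some p => pvGood p b) && pvSafe (b :: rest))
        || pvSafe (a :: rest)
  | _, _ => true

def can_pass_by_removing_one_alt (arr : List Int) : Bool :=
  pvFixable none arr || pvFixable none (arr.map (fun x => - x))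

-- ===== PRECONDITION & SPEC =====
def Spec_can_pass_by_removing_one (arr : List Int) (out : Bool) : Prop := out = can_pass_by_removing_one_alt arr
instance (arr : List Int) (out : Bool) : Decidable (Spec_can_pass_by_removing_one arr out) := by unfold Spec_can_pass_by_removing_one; infer_instance

-- ===== CLAIM (what is proved, stated in full; the proofs are below) =====
def Claim_equal_can_pass_by_removing_one : Prop := ∀ (arr : List Int), Dom_can_pass_by_removing_one arr → Spec_can_pass_by_removing_one arr (can_pass_by_removing_one arr)

-- ===== LEMMAS AND PROOFS =====

-- generic "every adjacent pair" scan, the common language of both proofs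
def pvPairAll (f : Int → Int → Bool) : List Int → Bool
  | a :: b :: rest => f a b && pvPairAll f (b :: rest)
  | _ => true

-- the brute-force specification both programs are reduced to (one direction)
def pvRemovalSpec (xs : List Int) : Bool :=
  pvSafe xs || (List.range xs.length).any (fun i => pvSafe (xs.eraseIdx i))

lemma pvSafe_eq_pairAll (xs : List Int) : pvSafe xs = pvPairAll pvGood xs := by
  induction xs with
  | nil => rfl
  | cons a t ih =>
    cases t with
    | nil => rfl
    | cons b r => simp only [pvSafe, pvPairAll] at *; rw [ih]

lemma pairAll_index (f : Int → Int → Bool) :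
    ∀ (arr : List Int),
      (List.range (arr.length - 1)).all (fun i => f (arr.getD i 0) (arr.getD (i + 1) 0))
        = pvPairAll f arr := by
  intro arr
  induction arr with
  | nil => rfl
  | cons a t ih =>
    cases t with
    | nil => rfl
    | cons b r =>
      simp only [List.length_cons, Nat.add_sub_cancel, List.range_succ_eq_map,
        List.all_cons, List.all_map, pvPairAll]
      simp only [List.length_cons, Nat.add_sub_cancel] at ih
      rw [← ih]
      rfl

lemma pyPairAll (f : Int → Int → Bool) (arr : List Int) :
    (PySem.List.pyRange 0 ((arr.length : Int) - 1) 1).all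
        (fun i => f (PySem.List.pyGetD arr i 0) (PySem.List.pyGetD arr (i + 1) 0))
      = pvPairAll f arr := by
  cases arr with
  | nil =>
    rw [show PySem.List.pyRange 0 ((([] : List Int).length : Int) - 1) 1 = [] from by decide]
    rfl
  | cons a t =>
    rw [show (((a :: t).length : Int) - 1) = ((t.length : Nat) : Int) from by push_cast [List.length_cons]; omega,
      PySem.List.pyRange_zero_natCast, List.all_map]
    have h := pairAll_index f (a :: t)
    simp only [List.length_cons, Nat.add_sub_cancel] at h
    rw [← h]
    congr 1
    funext k
    simp only [Function.comp, ← Nat.cast_add_one, PySem.List.pyGetD_natCast]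

lemma count_false_map {α : Type} (l : List α) (g : α → Bool) :
    ((l.map g).count false == 0) = l.all g := by
  induction l with
  | nil => rfl
  | cons a t ih =>
    simp only [List.map_cons, List.all_cons, List.count_cons]
    cases h : g a <;> simp [← ih]

lemma pairAll_and (f g : Int → Int → Bool) (xs : List Int) :
    (pvPairAll f xs && pvPairAll g xs) = pvPairAll (fun a b => f a b && g a b) xs := by
  induction xs with
  | nil => rfl
  | cons a t ih =>
    cases t with
    | nil => rfl
    | cons b r =>
      simp only [pvPairAll] at *
      rw [← ih]
      cases f a b <;> cases g a b <;> cases pvPairAll f (b :: r) <;> simp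

lemma pairAll_congr {f g : Int → Int → Bool} (h : ∀ a b, f a b = g a b) (xs : List Int) :
    pvPairAll f xs = pvPairAll g xs := by
  induction xs with
  | nil => rfl
  | cons a t ih =>
    cases t with
    | nil => rfl
    | cons b r => simp only [pvPairAll] at *; rw [h, ih]

lemma good_asc (a b : Int) : (decide (a ≤ b) && are_close a b 3) = pvGood a b := by
  apply Bool.eq_iff_iff.mpr
  simp only [are_close, pvGood, beq_iff_eq, Bool.and_eq_true, decide_eq_true_eq]
  split_ifs with h
  · simp; omega
  · simp [abs_le]; omega

lemma good_desc (a b : Int) : (decide (a ≥ b) && are_close a b 3) = pvGood b a := by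
  apply Bool.eq_iff_iff.mpr
  simp only [are_close, pvGood, beq_iff_eq, Bool.and_eq_true, decide_eq_true_eq]
  split_ifs with h
  · simp; omega
  · simp [abs_le]; omega

-- A's per-list check, in the common language
lemma acs_eq (arr : List Int) :
    are_close_and_sorted arr = (pvSafe arr || pvPairAll (fun a b => pvGood b a) arr) := by
  unfold are_close_and_sorted is_sorted
  simp only [count_false_map]
  rw [
    pyPairAll (fun a b => are_close a b 3),
    pyPairAll (fun a b => decide (a ≤ b)),
    pyPairAll (fun a b => decide (a ≥ b)),
    Bool.and_or_distrib_right, pairAll_and, pairAll_and,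
    pairAll_congr good_asc, pairAll_congr good_desc, ← pvSafe_eq_pairAll]

lemma pairAll_neg (xs : List Int) :
    pvPairAll (fun a b => pvGood b a) xs = pvSafe (xs.map (fun x => - x)) := by
  induction xs with
  | nil => rfl
  | cons a t ih =>
    cases t with
    | nil => rfl
    | cons b r =>
      simp only [pvPairAll, List.map_cons, pvSafe] at *
      rw [ih]
      congr 1
      apply Bool.eq_iff_iff.mpr
      simp only [pvGood, Bool.and_eq_true, decide_eq_true_eq]
      omega

-- core invariant of B's linear pass: with a good pair behind us, the pass decides
-- the brute-force removal spec of the remaining list prefixed by the previous element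
lemma fixAux_spec :
    ∀ (t : List Int) (a p : Int), pvGood p a = true →
      pvFixable (some p) (a :: t)
        = (pvSafe (p :: a :: t)
            || (List.range (a :: t).length).any (fun i => pvSafe (p :: (a :: t).eraseIdx i))) := by
  intro t
  induction t with
  | nil =>
    intro a p h
    simp [pvFixable, pvSafe, h]
  | cons b r ih =>
    intro a p h
    by_cases hg : pvGood a b = true
    · rw [show pvFixable (some p) (a :: b :: r) = pvFixable (some a) (b :: r) from by
        simp [pvFixable, hg]]
      rw [ih b a hg]
      simp only [List.length_cons, List.range_succ_eq_map, List.any_cons, List.any_map,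
        Function.comp_def]
      simp only [List.eraseIdx_cons_zero, List.eraseIdx_cons_succ, pvSafe, h, hg,
        Bool.true_and]
      cases pvSafe (b :: r) <;> cases pvGood p b <;> simp
    · rw [show pvFixable (some p) (a :: b :: r)
          = ((pvGood p b && pvSafe (b :: r)) || pvSafe (a :: r)) from by
        simp [pvFixable, hg]]
      simp only [Bool.not_eq_true] at hg
      simp only [List.length_cons, List.range_succ_eq_map, List.any_cons, List.any_map,
        Function.comp_def]
      simp only [List.eraseIdx_cons_zero, List.eraseIdx_cons_succ, pvSafe, h, hg,
        Bool.true_and, Bool.false_and, Bool.and_false]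
      cases pvSafe (b :: r) <;> cases pvGood p b <;> cases pvSafe (a :: r) <;>
        simp

lemma fix_spec (xs : List Int) : pvFixable none xs = pvRemovalSpec xs := by
  cases xs with
  | nil => rfl
  | cons a t =>
    cases t with
    | nil => rfl
    | cons b r =>
      unfold pvRemovalSpec
      by_cases hg : pvGood a b = true
      · rw [show pvFixable none (a :: b :: r) = pvFixable (some a) (b :: r) from by
          simp [pvFixable, hg]]
        rw [fixAux_spec r b a hg]
        simp only [List.length_cons, List.range_succ_eq_map, List.any_cons, List.any_map,
          Function.comp_def]
        simp only [List.eraseIdx_cons_zero, List.eraseIdx_cons_succ, pvSafe, hg, Bool.true_and]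
        cases pvSafe (b :: r) <;> simp
      · rw [show pvFixable none (a :: b :: r) = (pvSafe (b :: r) || pvSafe (a :: r)) from by
          simp [pvFixable, hg]]
        simp only [Bool.not_eq_true] at hg
        simp only [List.length_cons, List.range_succ_eq_map, List.any_cons, List.any_map,
          Function.comp_def]
        simp only [List.eraseIdx_cons_zero, List.eraseIdx_cons_succ, pvSafe, hg,
          Bool.false_and]
        cases pvSafe (b :: r) <;> cases pvSafe (a :: r) <;> simp

lemma any_or_distrib (l : List Nat) (f g : Nat → Bool) :
    (l.any (fun i => f i || g i)) = (l.any f || l.any g) := by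
  induction l with
  | nil => rfl
  | cons a t ih =>
    simp only [List.any_cons, ih]
    cases f a <;> cases g a <;> simp

lemma a_eq_spec (arr : List Int) :
    can_pass_by_removing_one arr
      = (pvRemovalSpec arr || pvRemovalSpec (arr.map (fun x => - x))) := by
  cases h : are_close_and_sorted arr with
  | true =>
    rw [show can_pass_by_removing_one arr = true from by
      simp [can_pass_by_removing_one, h]]
    rw [acs_eq, pairAll_neg] at h
    rcases (by simpa using h :
        pvSafe arr = true ∨ pvSafe (arr.map (fun x => - x)) = true) with h1 | h1 <;>
      simp [pvRemovalSpec, h1]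
  | false =>
    rw [show can_pass_by_removing_one arr
        = (PySem.List.pyRange 0 (arr.length : Int) 1).any
            (fun i => are_close_and_sorted
              (PySem.List.slice arr none (some i) ++ PySem.List.slice arr (some (i + 1)) none))
      from by simp [can_pass_by_removing_one, h]]
    rw [show ((arr.length : Int)) = ((arr.length : Nat) : Int) from rfl,
      PySem.List.pyRange_zero_natCast, List.any_map]
    have hpt : ∀ k : Nat,
        are_close_and_sorted
            (PySem.List.slice arr none (some ((k : Nat) : Int))
              ++ PySem.List.slice arr (some (((k : Nat) : Int) + 1)) none)
          = (pvSafe (arr.eraseIdx k) || pvSafe ((arr.map (fun x => - x)).eraseIdx k)) := by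
      intro k
      rw [PySem.List.slice_to arr (Int.natCast_nonneg k),
        show (((k : Nat) : Int) + 1) = (((k + 1 : Nat) : Nat) : Int) from by push_cast; ring,
        PySem.List.slice_from arr (Int.natCast_nonneg (k + 1)),
        Int.toNat_natCast, Int.toNat_natCast,
        ← List.eraseIdx_eq_take_drop_succ, acs_eq, pairAll_neg, List.eraseIdx_map]
    rw [acs_eq, pairAll_neg] at h
    rcases Bool.or_eq_false_iff.mp h with ⟨h1, h2⟩
    have := any_or_distrib (List.range arr.length)
      (fun k => pvSafe (arr.eraseIdx k))
      (fun k => pvSafe ((arr.map (fun x => - x)).eraseIdx k))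
    simp only [Function.comp_def, hpt]
    rw [this]
    simp [pvRemovalSpec, h1, h2]

-- ===== VERDICT (by name: the statement is the Claim_ definition above) =====
theorem can_pass_by_removing_one_spec : Claim_equal_can_pass_by_removing_one := by
  intro arr _
  unfold Spec_can_pass_by_removing_one can_pass_by_removing_one_alt
  rw [a_eq_spec, fix_spec, fix_spec]
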